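-- pv_equiv track=rewrite | github.com/Zuzah/transfer-investigation-agent | app/ingest.py | _find_break
-- ===== SOURCE A (Python) =====
-- def _find_break(text: str, near: int, tolerance: int) -> int:
--     """
--     Find the best natural break point in `text` near position `near`.
--
--     Search order (highest preference first):
--       1. Paragraph boundary (double newline) within [near - tolerance, near]
--       2. Sentence-ending punctuation (. ! ?) followed by whitespace
--       3. Word boundary (space)
--       4. Hard cut at `near` if no boundary is found
--
--     Args:
--         text: The full document text.
--         near: The target cut position (upper bound of the search window).
--         tolerance: How far back from `near` to search for a boundary.
--
--     Returns:
--         The recommended cut position (exclusive end index for slicing).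
--     """
--     window_start = max(0, near - tolerance)
--
--     # 1. Paragraph break
--     pos = text.rfind("\n\n", window_start, near)
--     if pos != -1:
--         return pos + 2  # include the blank line in the preceding chunk
--
--     # 2. Sentence boundary: punctuation followed by space or newline
--     best_sentence = -1
--     for punct in (".\n", "!\n", "?\n", ". ", "! ", "? "):
--         pos = text.rfind(punct, window_start, near)
--         if pos > best_sentence:
--             best_sentence = pos
--     if best_sentence != -1:
--         return best_sentence + 2  # include punctuation + delimiter
--
--     # 3. Word boundary
--     pos = text.rfind(" ", window_start, near)
--     if pos != -1:
--         return pos + 1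
--
--     # 4. Hard cut — no natural boundary found
--     return near
-- ===== SOURCE B (Python) =====
-- def _find_break(text: str, near: int, tolerance: int) -> int:
--     window_start = max(0, near - tolerance)
--     end = min(near, len(text))
--     para = sent = word = -1
--     for i in range(end - 1, window_start - 1, -1):
--         c = text[i]
--         if i + 2 <= end:
--             nxt = text[i + 1]
--             if para < 0 and c == "\n" and nxt == "\n":
--                 para = i
--             if sent < 0 and (c == "." or c == "!" or c == "?") and (nxt == " " or nxt == "\n"):
--                 sent = i
--         if word < 0 and c == " ":
--             word = i
--     if para >= 0:
--         return para + 2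
--     if sent >= 0:
--         return sent + 2
--     if word >= 0:
--         return word + 1
--     return near
-- ===== Notes on version B (the rewrite author's own statement) =====
-- stated objective: alternative
-- what changed: A calls str.rfind eight times (paragraph, six sentence patterns, space) over the same window; B makes one backward walk over the window recording the rightmost paragraph/sentence/word boundary and picks by priority afterwards.
-- intended difference: When near < 0 and a boundary lies in the wrapped window [max(0,near-tolerance), len(text)+near), A's rfind reinterprets near as the slice index len(text)+near and returns a positive break position, while B returns the hard cut near; for a negative cut request the 'no usable window' answer is the intended one rather than negative-index wraparound. — e.g. on _find_break("a b", -1, 5): A returns 2, B returns -1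
import Mathlib
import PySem

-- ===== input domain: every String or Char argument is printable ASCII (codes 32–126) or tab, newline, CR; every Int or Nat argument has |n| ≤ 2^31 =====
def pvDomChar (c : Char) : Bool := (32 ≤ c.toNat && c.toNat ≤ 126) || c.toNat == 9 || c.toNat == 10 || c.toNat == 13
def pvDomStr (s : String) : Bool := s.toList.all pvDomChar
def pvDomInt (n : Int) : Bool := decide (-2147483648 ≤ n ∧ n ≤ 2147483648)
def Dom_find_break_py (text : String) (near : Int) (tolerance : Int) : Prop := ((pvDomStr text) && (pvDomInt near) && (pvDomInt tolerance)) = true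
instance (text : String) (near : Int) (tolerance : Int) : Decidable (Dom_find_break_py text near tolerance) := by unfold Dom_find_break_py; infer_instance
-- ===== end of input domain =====

-- B replaces A's eight rfind window scans by one backward walk over the window that records the
-- rightmost paragraph/sentence/word boundary (objective: alternative single-pass decomposition).
-- On near < 0 (D_ below) A's rfind wraps the window end around; B makes the hard cut at near.

-- ===== PORT A =====
def find_break_py (text : String) (near : Int) (tolerance : Int) : Int :=
  let window_start := max 0 (near - tolerance)
  -- 1. Paragraph break
  let pos := PySem.Str.rfindFrom text "\n\n" window_start (some near)
  if pos ≠ -1 then pos + 2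
  else
    -- 2. Sentence boundary
    let best_sentence := [".\n", "!\n", "?\n", ". ", "! ", "? "].foldl
      (fun best punct =>
        let pos := PySem.Str.rfindFrom text punct window_start (some near)
        if pos > best then pos else best) (-1)
    if best_sentence ≠ -1 then best_sentence + 2
    else
      -- 3. Word boundary
      let pos := PySem.Str.rfindFrom text " " window_start (some near)
      if pos ≠ -1 then pos + 1
      else near

-- ===== PORT B =====
-- '\x00' stands in for text[i]'s out-of-range default (every index Source B reads is in range)
def pvPad : Char := Char.ofNat 0

-- the body of Source B's single for-loop (state = (para, sent, word))
def pvStep (cs : List Char) (endp : Int) (acc : Int × Int × Int) (i : Int) : Int × Int × Int :=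
  let c := PySem.List.pyGetD cs i pvPad
  let acc2 :=
    if i + 2 ≤ endp then
      let nxt := PySem.List.pyGetD cs (i + 1) pvPad
      let para := if acc.1 < 0 && (c == '\n') && (nxt == '\n') then i else acc.1
      let sent := if acc.2.1 < 0 && ((c == '.') || (c == '!') || (c == '?')) &&
                      ((nxt == ' ') || (nxt == '\n')) then i else acc.2.1
      (para, sent, acc.2.2)
    else acc
  (acc2.1, acc2.2.1, if acc2.2.2 < 0 && (c == ' ') then i else acc2.2.2)

def find_break_py_alt (text : String) (near : Int) (tolerance : Int) : Int :=
  let cs := text.toList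
  let window_start := max 0 (near - tolerance)
  let endp := min near (cs.length : Int)
  let st := (PySem.List.pyRange (endp - 1) (window_start - 1) (-1)).foldl (pvStep cs endp) (-1, -1, -1)
  if st.1 ≥ 0 then st.1 + 2
  else if st.2.1 ≥ 0 then st.2.1 + 2
  else if st.2.2 ≥ 0 then st.2.2 + 1
  else near

-- ===== PRECONDITION & SPEC =====
-- On near < 0 with a boundary in the wrapped window, A's rfind re-reads `near` as the slice index
-- len(text)+near and returns a break found in text[window_start : len(text)+near], while B (whose
-- window is empty) returns the hard cut `near`: the intended "no usable window" answer rather than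
-- an artefact of negative-index wraparound.
def D_find_break_py (text : String) (near : Int) (tolerance : Int) : Prop :=
  near < 0 ∧ ∃ p ∈ [[' '], ['\n', '\n'], ['.', '\n'], ['!', '\n'], ['?', '\n']],
    p <:+: PySem.List.slice text.toList (some (max 0 (near - tolerance))) (some near)
instance (text : String) (near : Int) (tolerance : Int) : Decidable (D_find_break_py text near tolerance) := by
  unfold D_find_break_py; infer_instance

def Spec_find_break_py (text : String) (near : Int) (tolerance : Int) (out : Int) : Prop :=
  ¬ D_find_break_py text near tolerance → out = find_break_py_alt text near tolerance
instance (text : String) (near : Int) (tolerance : Int) (out : Int) : Decidable (Spec_find_break_py text near tolerance out) := by unfold Spec_find_break_py; infer_instance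

def pvDiffWitness_find_break_py : String × Int × Int := ("a b", -1, 5)
def pvDiffWitnessOut_find_break_py : Int × Int := (2, -1)

-- ===== CLAIM (what is proved, stated in full; the proofs are below) =====
def Claim_unchanged_find_break_py : Prop := ∀ (text : String) (near : Int) (tolerance : Int), Dom_find_break_py text near tolerance → Spec_find_break_py text near tolerance (find_break_py text near tolerance)
def Claim_changed_find_break_py : Prop := Dom_find_break_py (pvDiffWitness_find_break_py.1) (pvDiffWitness_find_break_py.2.1) (pvDiffWitness_find_break_py.2.2) ∧ D_find_break_py (pvDiffWitness_find_break_py.1) (pvDiffWitness_find_break_py.2.1) (pvDiffWitness_find_break_py.2.2) ∧ find_break_py (pvDiffWitness_find_break_py.1) (pvDiffWitness_find_break_py.2.1) (pvDiffWitness_find_break_py.2.2) = pvDiffWitnessOut_find_break_py.1 ∧ find_break_py_alt (pvDiffWitness_find_break_py.1) (pvDiffWitness_find_break_py.2.1) (pvDiffWitness_find_break_py.2.2) = pvDiffWitnessOut_find_break_py.2 ∧ pvDiffWitnessOut_find_break_py.1 ≠ pvDiffWitnessOut_find_break_py.2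
def Claim_exact_find_break_py : Prop := ∀ (text : String) (near : Int) (tolerance : Int), Dom_find_break_py text near tolerance → D_find_break_py text near tolerance → find_break_py text near tolerance ≠ find_break_py_alt text near tolerance

-- ===== LEMMAS AND PROOFS =====

-- the clamped window [pvWs, pvEnd) that Python's rfind(sub, window_start, near) actually searches
-- the clamped window [pvWs, pvEnd) that Python's rfind(sub, window_start, near) actually searches
def pvWs (near tolerance : Int) : Nat := (max 0 (near - tolerance)).toNat
def pvEnd (near : Int) (n : Nat) : Nat := if near < 0 then (near + n).toNat else min near.toNat n

-- boundary predicates at index j (vocabulary of the proofs)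
def patPar (cs : List Char) (j : Nat) : Bool :=
  (cs.getD j pvPad == '\n') && (cs.getD (j + 1) pvPad == '\n')
def patSent (cs : List Char) (j : Nat) : Bool :=
  ((cs.getD j pvPad == '.') || (cs.getD j pvPad == '!') || (cs.getD j pvPad == '?')) &&
  ((cs.getD (j + 1) pvPad == ' ') || (cs.getD (j + 1) pvPad == '\n'))
def patWord (cs : List Char) (j : Nat) : Bool := cs.getD j pvPad == ' '
-- rmostI s p e = greatest i with s ≤ i < e and p i, else -1
def rmostI (s : Nat) (p : Nat → Bool) : Nat → Int
  | 0 => -1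
  | e + 1 => if e < s then -1 else if p e then (e : Int) else rmostI s p e

theorem rmostI_neg_one_le (s : Nat) (p : Nat → Bool) (e : Nat) : -1 ≤ rmostI s p e := by
  induction e with
  | zero => simp [rmostI]
  | succ e ih => simp only [rmostI]; split_ifs <;> omega

theorem rmostI_lt_coe (s : Nat) (p : Nat → Bool) (e : Nat) : rmostI s p e < (e : Int) := by
  induction e with
  | zero => simp [rmostI]
  | succ e ih => simp only [rmostI]; split_ifs <;> push_cast <;> omega

theorem rmostI_eq_neg_one_of_le (s : Nat) (p : Nat → Bool) (e : Nat) (h : e ≤ s) :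
    rmostI s p e = -1 := by
  induction e with
  | zero => simp [rmostI]
  | succ e ih => simp only [rmostI]; rw [if_pos (by omega)]

theorem rmostI_eq_neg_one_iff (s : Nat) (p : Nat → Bool) (e : Nat) :
    rmostI s p e = -1 ↔ ∀ i, s ≤ i → i < e → p i = false := by
  induction e with
  | zero => simp [rmostI]
  | succ e ih =>
    simp only [rmostI]
    by_cases h1 : e < s
    · rw [if_pos h1]
      constructor
      · intro _ i hi1 hi2; omega
      · intro _; rfl
    · rw [if_neg h1]
      cases hpe : p e with
      | false =>
        rw [if_neg (by simp), ih]
        constructor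
        · intro h i hi1 hi2
          rcases Nat.lt_succ_iff_lt_or_eq.mp hi2 with h' | h'
          · exact h i hi1 h'
          · subst h'; exact hpe
        · intro h i hi1 hi2; exact h i hi1 (by omega)
      | true =>
        rw [if_pos rfl]
        constructor
        · intro hc; omega
        · intro h
          have := h e (by omega) (by omega)
          rw [hpe] at this; cases this

theorem rmostI_congr (s : Nat) (p q : Nat → Bool) (e : Nat)
    (h : ∀ i, s ≤ i → i < e → p i = q i) : rmostI s p e = rmostI s q e := by
  induction e with
  | zero => rfl
  | succ e ih =>
    simp only [rmostI]
    by_cases h1 : e < s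
    · simp [h1]
    · rw [h e (by omega) (by omega)]
      split_ifs with h2
      · rfl
      · exact ih (fun i a b => h i a (by omega))

theorem rmostI_max (s : Nat) (p q : Nat → Bool) (e : Nat) :
    max (rmostI s p e) (rmostI s q e) = rmostI s (fun i => p i || q i) e := by
  induction e with
  | zero => simp [rmostI]
  | succ e ih =>
    have hp := rmostI_lt_coe s p e
    have hq := rmostI_lt_coe s q e
    have hp1 := rmostI_neg_one_le s p e
    have hq1 := rmostI_neg_one_le s q e
    simp only [rmostI]
    by_cases h1 : e < s
    · simp [h1]
    · simp only [if_neg h1]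
      rcases Bool.eq_false_or_eq_true (p e) with hpe | hpe <;>
        rcases Bool.eq_false_or_eq_true (q e) with hqe | hqe <;>
        simp only [hpe, hqe, Bool.false_or, Bool.true_or, Bool.or_self, if_true, if_false,
          Bool.false_eq_true, ← ih] <;> omega

theorem rmostI_succ_false (s : Nat) (p : Nat → Bool) (e : Nat) (h : p e = false) :
    rmostI s p (e + 1) = rmostI s p e := by
  simp only [rmostI, h, Bool.false_eq_true, if_false]
  by_cases h1 : e < s
  · rw [if_pos h1, rmostI_eq_neg_one_of_le s p e (by omega)]
  · rw [if_neg h1]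

-- strip Source B's "i + 2 <= end" guard: a guarded scan over [s,e) is an unguarded scan over [s,e-1)
theorem rmostI_guard (s : Nat) (p : Nat → Bool) (e : Nat) :
    rmostI s (fun j => decide (j + 2 ≤ e) && p j) e = rmostI s p (e - 1) := by
  cases e with
  | zero => rfl
  | succ e =>
    rw [rmostI_succ_false s _ e (by rw [decide_eq_false (show ¬ (e + 2 ≤ e + 1) from by omega)]; simp)]
    simp only [Nat.succ_sub_one]
    exact rmostI_congr s _ p e (fun i hi1 hi2 => by
      rw [decide_eq_true (show i + 2 ≤ e + 1 from by omega)]; simp)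

-- shifting the base of a scan
theorem rmostI_shift (t : Nat) (p : Nat → Bool) (e : Nat) :
    (if rmostI 0 (fun r => p (t + r)) e = -1 then (-1 : Int) else (t : Int) + rmostI 0 (fun r => p (t + r)) e)
      = rmostI t p (t + e) := by
  induction e with
  | zero => simp [rmostI, rmostI_eq_neg_one_of_le t p t le_rfl]
  | succ e ih =>
    rw [show rmostI 0 (fun r => p (t + r)) (e + 1)
          = if p (t + e) then (e : Int) else rmostI 0 (fun r => p (t + r)) e from by
        simp [rmostI]]
    have h2 : rmostI t p (t + (e + 1)) = if p (t + e) then ((t + e : Nat) : Int) else rmostI t p (t + e) := by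
      rw [show t + (e + 1) = (t + e) + 1 from by omega]
      simp only [rmostI]
      rw [if_neg (show ¬ (t + e < t) from by omega)]
    rw [h2]
    rcases Bool.eq_false_or_eq_true (p (t + e)) with hpe | hpe
    · simp only [hpe, if_true]
      rw [if_neg (show ¬ ((e : Int) = -1) from by omega)]
      push_cast; ring
    · simpa [hpe] using ih

-- Chars.rfind characterised as a rightmost scan
theorem rfind_go_eq (l sub : List Char) (k : Nat) :
    PySem.Chars.rfind.go l sub k = rmostI 0 (fun i => sub.isPrefixOf (l.drop i)) (k + 1) := by
  induction k with
  | zero => simp [PySem.Chars.rfind.go, rmostI]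
  | succ k ih =>
    rw [PySem.Chars.rfind.go]
    simp only [rmostI, ih]
    rcases Bool.eq_false_or_eq_true (sub.isPrefixOf (l.drop (k + 1))) with hpe | hpe <;>
      simp [hpe]

theorem rfind_eq (l sub : List Char) :
    PySem.Chars.rfind l sub = rmostI 0 (fun i => sub.isPrefixOf (l.drop i)) (l.length + 1) :=
  rfind_go_eq l sub l.length

theorem pvEnd_le (e : Int) (n : Nat) : pvEnd e n ≤ n := by
  unfold pvEnd; split_ifs <;> omega

theorem rfindFrom_eq_rmostI (cs sub : List Char) (s e : Int) (hs : 0 ≤ s) :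
    PySem.Chars.rfindFrom cs sub s (some e)
      = rmostI s.toNat (fun j => sub.isPrefixOf ((cs.take (pvEnd e cs.length)).drop j)) (pvEnd e cs.length + 1) := by
  simp only [PySem.Chars.rfindFrom]
  rw [if_neg (not_lt.mpr hs)]
  rw [show (if (cs.length : Int) < e then (cs.length : Int)
        else if e < 0 then (if e + cs.length < 0 then 0 else e + cs.length) else e)
      = (pvEnd e cs.length : Int) from by
    unfold pvEnd; split_ifs <;> push_cast <;> omega]
  simp only [Int.toNat_natCast]
  by_cases hlt : (pvEnd e cs.length : Int) < s
  · rw [if_pos hlt, rmostI_eq_neg_one_of_le _ _ _ (by omega)]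
  · rw [if_neg hlt, rfind_eq]
    have hlen : (List.drop s.toNat (List.take (pvEnd e cs.length) cs)).length
        = pvEnd e cs.length - s.toNat := by
      have := pvEnd_le e cs.length
      simp [List.length_drop, List.length_take]
      omega
    have hpred : (fun i => sub.isPrefixOf ((List.drop s.toNat (List.take (pvEnd e cs.length) cs)).drop i))
        = (fun i => sub.isPrefixOf ((List.take (pvEnd e cs.length) cs).drop (s.toNat + i))) := by
      funext i
      rw [List.drop_drop, Nat.add_comm]
    rw [hlen, hpred]
    have hcast : (s : Int) = (s.toNat : Int) := by omega
    rw [hcast]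
    simp only [Int.toNat_natCast]
    rw [rmostI_shift s.toNat (fun j => sub.isPrefixOf ((List.take (pvEnd e cs.length) cs).drop j)) (pvEnd e cs.length - s.toNat + 1)]
    congr 1
    omega

theorem prefix_two_drop (l : List Char) (c1 c2 : Char) (j : Nat) :
    ([c1, c2] <+: l.drop j) ↔ l[j]? = some c1 ∧ l[j + 1]? = some c2 := by
  have h0 : (l.drop j)[0]? = l[j]? := by rw [List.getElem?_drop]; norm_num
  have h1 : (l.drop j)[1]? = l[j + 1]? := by rw [List.getElem?_drop]
  rw [← h0, ← h1]
  generalize l.drop j = t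
  cases t with
  | nil => simp
  | cons a u =>
    cases u with
    | nil => simp [List.cons_prefix_cons, eq_comm]
    | cons b v => simp [List.cons_prefix_cons, eq_comm]

theorem prefix_one_drop (l : List Char) (c : Char) (j : Nat) :
    ([c] <+: l.drop j) ↔ l[j]? = some c := by
  have h0 : (l.drop j)[0]? = l[j]? := by rw [List.getElem?_drop]; norm_num
  rw [← h0]
  generalize l.drop j = t
  cases t with
  | nil => simp
  | cons a u => simp [List.cons_prefix_cons, eq_comm]

theorem getElem?_eq_getD (l : List Char) (j : Nat) (c d : Char) (h : j < l.length) :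
    l[j]? = some c ↔ l.getD j d = c := by
  rw [List.getElem?_eq_getElem h, List.getD_eq_getElem l d h]
  simp

theorem patPar_iff (cs : List Char) (j : Nat) (h : j + 1 < cs.length) :
    patPar cs j = true ↔ (cs[j]? = some '\n' ∧ cs[j + 1]? = some '\n') := by
  rw [patPar, Bool.and_eq_true, beq_iff_eq, beq_iff_eq,
      getElem?_eq_getD cs j '\n' pvPad (by omega), getElem?_eq_getD cs (j + 1) '\n' pvPad h]

theorem patSent_iff (cs : List Char) (j : Nat) (h : j + 1 < cs.length) :
    patSent cs j = true ↔
      ((cs[j]? = some '.' ∨ cs[j]? = some '!' ∨ cs[j]? = some '?') ∧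
       (cs[j + 1]? = some ' ' ∨ cs[j + 1]? = some '\n')) := by
  rw [patSent, Bool.and_eq_true, Bool.or_eq_true, Bool.or_eq_true, Bool.or_eq_true,
      beq_iff_eq, beq_iff_eq, beq_iff_eq, beq_iff_eq, beq_iff_eq,
      getElem?_eq_getD cs j '.' pvPad (by omega), getElem?_eq_getD cs j '!' pvPad (by omega),
      getElem?_eq_getD cs j '?' pvPad (by omega), getElem?_eq_getD cs (j + 1) ' ' pvPad h,
      getElem?_eq_getD cs (j + 1) '\n' pvPad h, or_assoc]

theorem patWord_iff (cs : List Char) (j : Nat) (h : j < cs.length) :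
    patWord cs j = true ↔ cs[j]? = some ' ' := by
  rw [patWord, beq_iff_eq, getElem?_eq_getD cs j ' ' pvPad h]

theorem isPrefixOf_two_short (l : List Char) (c1 c2 : Char) (h : l.length ≤ 1) :
    ([c1, c2].isPrefixOf l) = false := by
  cases l with
  | nil => rfl
  | cons a t =>
    cases t with
    | nil => simp [List.isPrefixOf]
    | cons b u => simp at h

-- A's two-char rfind over the clamped window, as a rightmost scan of the pair pattern
theorem rfindFrom_two (cs : List Char) (c1 c2 : Char) (s e : Int) (hs : 0 ≤ s) :
    PySem.Chars.rfindFrom cs [c1, c2] s (some e)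
      = rmostI s.toNat (fun j => (cs.getD j pvPad == c1) && (cs.getD (j + 1) pvPad == c2))
          (pvEnd e cs.length - 1) := by
  rw [rfindFrom_eq_rmostI cs [c1, c2] s e hs]
  have hle := pvEnd_le e cs.length
  cases hE : pvEnd e cs.length with
  | zero =>
    rw [show (0 : Nat) + 1 = 0 + 1 from rfl]
    rw [rmostI_succ_false _ _ 0 (by simp)]
    simp [rmostI]
  | succ E =>
    rw [rmostI_succ_false _ _ (E + 1) (by rw [isPrefixOf_two_short]; simp)]
    rw [rmostI_succ_false _ _ E (by rw [isPrefixOf_two_short]; simp)]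
    simp only [Nat.succ_sub_one]
    apply rmostI_congr
    intro i hi1 hi2
    have hilen : i + 1 < cs.length := by omega
    rw [show (List.take (E + 1) cs).drop i = (cs.drop i).take (E + 1 - i) from List.drop_take .. ]
    rw [Bool.eq_iff_iff]
    simp only [List.isPrefixOf_iff_prefix, Bool.and_eq_true, beq_iff_eq]
    rw [List.prefix_take_iff, prefix_two_drop]
    rw [getElem?_eq_getD cs i c1 pvPad (by omega), getElem?_eq_getD cs (i+1) c2 pvPad (by omega)]
    constructor
    · rintro ⟨⟨ha, hb⟩, _⟩; exact ⟨ha, hb⟩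
    · rintro ⟨ha, hb⟩; exact ⟨⟨ha, hb⟩, by simp; omega⟩

theorem rfindFrom_one (cs : List Char) (c : Char) (s e : Int) (hs : 0 ≤ s) :
    PySem.Chars.rfindFrom cs [c] s (some e)
      = rmostI s.toNat (fun j => cs.getD j pvPad == c) (pvEnd e cs.length) := by
  rw [rfindFrom_eq_rmostI cs [c] s e hs]
  have hle := pvEnd_le e cs.length
  rw [rmostI_succ_false _ _ (pvEnd e cs.length) (by
    rw [show (List.take (pvEnd e cs.length) cs).drop (pvEnd e cs.length) = [] from by
      apply List.drop_eq_nil_of_le; simp]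
    rfl)]
  apply rmostI_congr
  intro i hi1 hi2
  have hilen : i < cs.length := by omega
  rw [show (List.take (pvEnd e cs.length) cs).drop i = (cs.drop i).take (pvEnd e cs.length - i) from List.drop_take ..]
  rw [Bool.eq_iff_iff]
  simp only [List.isPrefixOf_iff_prefix, beq_iff_eq]
  rw [List.prefix_take_iff, prefix_one_drop]
  rw [getElem?_eq_getD cs i c pvPad (by omega)]
  constructor
  · rintro ⟨ha, _⟩; exact ha
  · intro ha; exact ⟨ha, by simp; omega⟩

theorem maxI (a b : Int) : (if a < b then b else a) = max a b := by omega

theorem sentBool (x y : Char) :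
    ((((((x == '.') && (y == '\n') || ((x == '!') && (y == '\n'))) || ((x == '?') && (y == '\n'))) ||
        ((x == '.') && (y == ' '))) || ((x == '!') && (y == ' '))) || ((x == '?') && (y == ' ')))
      = (((x == '.') || (x == '!') || (x == '?')) && ((y == ' ') || (y == '\n'))) := by
  rcases Bool.eq_false_or_eq_true (x == '.') with h1 | h1 <;>
  rcases Bool.eq_false_or_eq_true (x == '!') with h2 | h2 <;>
  rcases Bool.eq_false_or_eq_true (x == '?') with h3 | h3 <;>
  rcases Bool.eq_false_or_eq_true (y == ' ') with h4 | h4 <;>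
  rcases Bool.eq_false_or_eq_true (y == '\n') with h5 | h5 <;>
  simp [h1, h2, h3, h4, h5]

-- A's six sentence patterns, merged into patSent
theorem sentUnion (cs : List Char) (s e : Nat) :
    rmostI s (fun i =>
      (((((cs.getD i pvPad == '.') && (cs.getD (i + 1) pvPad == '\n') ||
          ((cs.getD i pvPad == '!') && (cs.getD (i + 1) pvPad == '\n'))) ||
          ((cs.getD i pvPad == '?') && (cs.getD (i + 1) pvPad == '\n'))) ||
          ((cs.getD i pvPad == '.') && (cs.getD (i + 1) pvPad == ' '))) ||
          ((cs.getD i pvPad == '!') && (cs.getD (i + 1) pvPad == ' '))) ||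
          ((cs.getD i pvPad == '?') && (cs.getD (i + 1) pvPad == ' '))) e
      = rmostI s (patSent cs) e :=
  rmostI_congr s _ (patSent cs) e (fun i _ _ => sentBool (cs.getD i pvPad) (cs.getD (i + 1) pvPad))

-- A's whole body, as the three rightmost scans in priority order
theorem find_break_py_eq (text : String) (near : Int) (tolerance : Int) :
    find_break_py text near tolerance =
      (let cs := text.toList
       let s := pvWs near tolerance
       let e := pvEnd near cs.length
       let a := rmostI s (patPar cs) (e - 1)
       let b := rmostI s (patSent cs) (e - 1)
       let c := rmostI s (patWord cs) e
       if a ≠ -1 then a + 2 else if b ≠ -1 then b + 2 else if c ≠ -1 then c + 1 else near) := by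
  have hws : (0 : Int) ≤ max 0 (near - tolerance) := le_max_left 0 _
  have hwsN : (max 0 (near - tolerance)).toNat = pvWs near tolerance := rfl
  simp only [find_break_py, PySem.Str.rfindFrom_eq, List.foldl]
  rw [show ("\n\n".toList) = ['\n', '\n'] from rfl,
      show (".\n".toList) = ['.', '\n'] from rfl,
      show ("!\n".toList) = ['!', '\n'] from rfl,
      show ("?\n".toList) = ['?', '\n'] from rfl,
      show (". ".toList) = ['.', ' '] from rfl,
      show ("! ".toList) = ['!', ' '] from rfl,
      show ("? ".toList) = ['?', ' '] from rfl,
      show (" ".toList) = [' '] from rfl]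
  simp only [rfindFrom_two _ _ _ _ near hws, rfindFrom_one _ _ _ near hws, hwsN, gt_iff_lt, maxI]
  rw [max_eq_right (rmostI_neg_one_le _ _ _)]
  simp only [rmostI_max]
  rw [sentUnion text.toList]
  rfl

-- guarded predicates of Source B's loop, and its loop invariant
def gPar (cs : List Char) (e : Nat) (j : Nat) : Bool := decide (j + 2 ≤ e) && patPar cs j

def gSent (cs : List Char) (e : Nat) (j : Nat) : Bool := decide (j + 2 ≤ e) && patSent cs j

def pick (x y : Int) : Int := if x < 0 then y else x

theorem pvStep_spec (cs : List Char) (eN w k : Nat) (p s q : Int) :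
    pvStep cs (eN : Int) (p, s, q) ((w + k : Nat) : Int)
      = (if p < 0 && gPar cs eN (w + k) then ((w + k : Nat) : Int) else p,
         if s < 0 && gSent cs eN (w + k) then ((w + k : Nat) : Int) else s,
         if q < 0 && patWord cs (w + k) then ((w + k : Nat) : Int) else q) := by
  simp only [pvStep, gPar, gSent, patPar, patSent, patWord]
  rw [show ((w + k : Nat) : Int) + 1 = ((w + k + 1 : Nat) : Int) from by push_cast; ring]
  simp only [PySem.List.pyGetD_natCast]
  by_cases h : ((w + k : Nat) : Int) + 2 ≤ (eN : Int)
  · have hd : decide (w + k + 2 ≤ eN) = true := decide_eq_true (by omega)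
    simp only [if_pos h, hd, Bool.true_and, Bool.and_assoc]
    rfl
  · have hd : decide (w + k + 2 ≤ eN) = false := decide_eq_false (by omega)
    simp only [if_neg h, hd, Bool.false_and, Bool.and_false, Bool.false_eq_true, if_false]
    rfl

theorem pick_step (w k : Nat) (g : Nat → Bool) (p : Int) :
    pick (if p < 0 && g (w + k) then ((w + k : Nat) : Int) else p) (rmostI w g (w + k))
      = pick p (rmostI w g (w + k + 1)) := by
  have h1 : rmostI w g (w + k + 1) = if g (w + k) then ((w + k : Nat) : Int) else rmostI w g (w + k) := by
    simp only [rmostI]; rw [if_neg (by omega)]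
  rw [h1]
  by_cases hp : p < 0
  · rcases Bool.eq_false_or_eq_true (g (w + k)) with hg | hg
    · simp [pick, hp, hg]
      omega
    · simp [pick, hp, hg]
  · simp [pick, hp]

theorem bloop_inv (cs : List Char) (eN w k : Nat) (p s q : Int)
    (hp : -1 ≤ p) (hs : -1 ≤ s) (hq : -1 ≤ q) :
    (PySem.List.pyRange ((w : Int) + k - 1) ((w : Int) - 1) (-1)).foldl (pvStep cs (eN : Int)) (p, s, q)
      = (pick p (rmostI w (gPar cs eN) (w + k)),
         pick s (rmostI w (gSent cs eN) (w + k)),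
         pick q (rmostI w (patWord cs) (w + k))) := by
  induction k generalizing p s q with
  | zero =>
    rw [PySem.List.pyRange_neg_one_eq_nil (by omega)]
    rw [rmostI_eq_neg_one_of_le _ _ _ (by omega), rmostI_eq_neg_one_of_le _ _ _ (by omega),
        rmostI_eq_neg_one_of_le _ _ _ (by omega)]
    simp only [List.foldl_nil, pick]
    congr 1 <;> [skip; congr 1] <;> split_ifs <;> omega
  | succ k ih =>
    rw [show (w : Int) + ((k : Nat) + 1 : Nat) - 1 = (w : Int) + k from by push_cast; ring]
    rw [PySem.List.pyRange_neg_one_cons (by omega)]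
    rw [List.foldl_cons]
    have hwk : ((w : Int) + k) = (((w + k : Nat) : Int)) := by push_cast; ring
    rw [hwk]
    rw [pvStep_spec cs eN w k p s q]
    rw [show ((w + k : Nat) : Int) - 1 = (w : Int) + (k : Int) - 1 from by push_cast; ring]
    rw [ih _ _ _ (by split_ifs <;> omega) (by split_ifs <;> omega) (by split_ifs <;> omega)]
    rw [Prod.mk.injEq, Prod.mk.injEq]
    exact ⟨pick_step w k (gPar cs eN) p, pick_step w k (gSent cs eN) s, pick_step w k (patWord cs) q⟩

theorem prio_ge_ne (a b c near : Int) :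
    (if a ≥ 0 then a + 2 else if b ≥ 0 then b + 2 else if c ≥ 0 then c + 1 else near)
      = (if a ≠ -1 then a + 2 else if b ≠ -1 then b + 2 else if c ≠ -1 then c + 1 else near) ∨
    ¬ (-1 ≤ a ∧ -1 ≤ b ∧ -1 ≤ c) := by
  by_cases h : -1 ≤ a ∧ -1 ≤ b ∧ -1 ≤ c
  · left; obtain ⟨ha, hb, hc⟩ := h; split_ifs <;> omega
  · right; exact h

theorem gPar_rm (cs : List Char) (e s : Nat) :
    rmostI s (gPar cs e) e = rmostI s (patPar cs) (e - 1) := rmostI_guard s (patPar cs) e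

theorem gSent_rm (cs : List Char) (e s : Nat) :
    rmostI s (gSent cs e) e = rmostI s (patSent cs) (e - 1) := rmostI_guard s (patSent cs) e

theorem find_break_py_alt_neg (text : String) (near : Int) (tolerance : Int) (h : near < 0) :
    find_break_py_alt text near tolerance = near := by
  simp only [find_break_py_alt]
  rw [show min near (text.toList.length : Int) = near from by omega]
  rw [PySem.List.pyRange_neg_one_eq_nil (by
    have : (0 : Int) ≤ max 0 (near - tolerance) := le_max_left 0 _
    omega)]
  norm_num

theorem find_break_py_alt_eq (text : String) (near : Int) (tolerance : Int) (h : 0 ≤ near) :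
    find_break_py_alt text near tolerance =
      (let cs := text.toList
       let s := pvWs near tolerance
       let e := pvEnd near cs.length
       let a := rmostI s (patPar cs) (e - 1)
       let b := rmostI s (patSent cs) (e - 1)
       let c := rmostI s (patWord cs) e
       if a ≠ -1 then a + 2 else if b ≠ -1 then b + 2 else if c ≠ -1 then c + 1 else near) := by
  simp only [find_break_py_alt]
  have hws : (0 : Int) ≤ max 0 (near - tolerance) := le_max_left 0 _
  have hwsc : max 0 (near - tolerance) = ((pvWs near tolerance : Nat) : Int) := by
    unfold pvWs; omega
  have hec : min near (text.toList.length : Int) = ((pvEnd near text.toList.length : Nat) : Int) := by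
    unfold pvEnd
    rw [if_neg (not_lt.mpr h)]
    omega
  rw [hwsc, hec]
  by_cases hwe : pvWs near tolerance ≤ pvEnd near text.toList.length
  · rw [show ((pvEnd near text.toList.length : Nat) : Int) - 1
        = ((pvWs near tolerance : Nat) : Int) + ((pvEnd near text.toList.length - pvWs near tolerance : Nat) : Int) - 1 from by omega]
    rw [bloop_inv text.toList (pvEnd near text.toList.length) (pvWs near tolerance)
        (pvEnd near text.toList.length - pvWs near tolerance) (-1) (-1) (-1) (by omega) (by omega) (by omega)]
    rw [show pvWs near tolerance + (pvEnd near text.toList.length - pvWs near tolerance)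
        = pvEnd near text.toList.length from by omega]
    simp only [pick, if_pos (show (-1 : Int) < 0 from by omega)]
    rw [gPar_rm, gSent_rm]
    have hA := rmostI_neg_one_le (pvWs near tolerance) (patPar text.toList) (pvEnd near text.toList.length - 1)
    have hB := rmostI_neg_one_le (pvWs near tolerance) (patSent text.toList) (pvEnd near text.toList.length - 1)
    have hC := rmostI_neg_one_le (pvWs near tolerance) (patWord text.toList) (pvEnd near text.toList.length)
    rcases prio_ge_ne (rmostI (pvWs near tolerance) (patPar text.toList) (pvEnd near text.toList.length - 1))
        (rmostI (pvWs near tolerance) (patSent text.toList) (pvEnd near text.toList.length - 1))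
        (rmostI (pvWs near tolerance) (patWord text.toList) (pvEnd near text.toList.length)) near with hpr | hpr
    · exact hpr
    · exact absurd ⟨hA, hB, hC⟩ hpr
  · rw [PySem.List.pyRange_neg_one_eq_nil (by omega)]
    simp only [List.foldl_nil]
    rw [rmostI_eq_neg_one_of_le _ _ _ (by omega), rmostI_eq_neg_one_of_le _ _ _ (by omega),
        rmostI_eq_neg_one_of_le _ _ _ (by omega)]
    norm_num

theorem rmostI_ne_of_wit (s : Nat) (p : Nat → Bool) (e j : Nat)
    (h1 : s ≤ j) (h2 : j < e) (h3 : p j = true) : rmostI s p e ≠ -1 := by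
  intro heq
  have := (rmostI_eq_neg_one_iff s p e).mp heq j h1 h2
  rw [h3] at this; cases this

theorem infix_iff_drop (l t : List Char) : l <:+: t ↔ ∃ k, l <+: t.drop k := by
  constructor
  · rintro ⟨s', t', rfl⟩
    exact ⟨s'.length, by simp⟩
  · rintro ⟨k, hp⟩
    exact hp.isInfix.trans (t.drop_suffix k).isInfix

theorem seg_infix2 (cs : List Char) (w e : Nat) (c1 c2 : Char) :
    [c1, c2] <:+: (cs.take e).drop w ↔
      ∃ j, w ≤ j ∧ j + 2 ≤ e ∧ cs[j]? = some c1 ∧ cs[j + 1]? = some c2 := by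
  rw [infix_iff_drop]
  constructor
  · rintro ⟨k, hp⟩
    rw [List.drop_drop, prefix_two_drop] at hp
    obtain ⟨h1, h2⟩ := hp
    rw [List.getElem?_take] at h1 h2
    by_cases hb : w + k + 1 < e
    · rw [if_pos (by omega)] at h1
      rw [if_pos hb] at h2
      exact ⟨w + k, by omega, by omega, h1, h2⟩
    · rcases Nat.lt_or_ge (w + k) e with hlt | hge
      · rw [if_neg hb] at h2; cases h2
      · rw [if_neg (by omega)] at h1; cases h1
  · rintro ⟨j, h1, h2, h3, h4⟩
    refine ⟨j - w, ?_⟩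
    rw [List.drop_drop, prefix_two_drop, show w + (j - w) = j from by omega]
    constructor
    · rw [List.getElem?_take, if_pos (by omega)]; exact h3
    · rw [List.getElem?_take, if_pos (by omega)]; exact h4

theorem seg_infix1 (cs : List Char) (w e : Nat) (c : Char) :
    [c] <:+: (cs.take e).drop w ↔ ∃ j, w ≤ j ∧ j < e ∧ cs[j]? = some c := by
  rw [infix_iff_drop]
  constructor
  · rintro ⟨k, hp⟩
    rw [List.drop_drop, prefix_one_drop, List.getElem?_take] at hp
    by_cases hb : w + k < e
    · rw [if_pos hb] at hp
      exact ⟨w + k, by omega, hb, hp⟩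
    · rw [if_neg hb] at hp; cases hp
  · rintro ⟨j, h1, h2, h3⟩
    refine ⟨j - w, ?_⟩
    rw [List.drop_drop, prefix_one_drop, show w + (j - w) = j from by omega,
        List.getElem?_take, if_pos (by omega)]
    exact h3

theorem slice_eq_seg (cs : List Char) (w e : Int) (hw : 0 ≤ w) :
    PySem.List.slice cs (some w) (some e) = (cs.take (pvEnd e cs.length)).drop w.toNat := by
  simp only [PySem.List.slice, PySem.List.clampIdx]
  rw [if_neg (not_lt.mpr hw)]
  rw [show (if e < 0 then if (cs.length : Int) + e < 0 then 0 else ((cs.length : Int) + e).toNat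
        else min e.toNat cs.length) = pvEnd e cs.length from by
    simp only [pvEnd]; split_ifs <;> omega]
  rw [List.drop_take]
  by_cases h : w.toNat ≤ cs.length
  · rw [show min w.toNat cs.length = w.toNat from by omega]
  · have h1 : List.drop (min w.toNat cs.length) cs = [] := by
      apply List.drop_eq_nil_of_le; omega
    have h2 : List.drop w.toNat cs = [] := by
      apply List.drop_eq_nil_of_le; omega
    rw [h1, h2, List.take_nil, List.take_nil]

theorem D_iff_ex (text : String) (near tolerance : Int) (hneg : near < 0) :
    (∃ p ∈ [[' '], ['\n', '\n'], ['.', '\n'], ['!', '\n'], ['?', '\n']],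
      p <:+: PySem.List.slice text.toList (some (max 0 (near - tolerance))) (some near)) ↔
    (∃ j < (near + (text.toList.length : Int)).toNat, (near - tolerance).toNat ≤ j ∧
      (text.toList[j]? = some ' ' ∨
        (j + 2 ≤ (near + (text.toList.length : Int)).toNat ∧ text.toList[j + 1]? = some '\n' ∧
          (text.toList[j]? = some '\n' ∨ text.toList[j]? = some '.' ∨ text.toList[j]? = some '!' ∨
            text.toList[j]? = some '?')))) := by
  rw [slice_eq_seg _ _ _ (le_max_left 0 _)]
  rw [show (max 0 (near - tolerance)).toNat = (near - tolerance).toNat from by omega]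
  rw [show pvEnd near text.toList.length = (near + (text.toList.length : Int)).toNat from by
    unfold pvEnd; rw [if_pos hneg]]
  constructor
  · rintro ⟨p, hp, hinf⟩
    simp only [List.mem_cons, List.not_mem_nil, or_false] at hp
    rcases hp with rfl | rfl | rfl | rfl | rfl
    · obtain ⟨j, h1, h2, h3⟩ := (seg_infix1 _ _ _ _).mp hinf
      exact ⟨j, h2, h1, Or.inl h3⟩
    · obtain ⟨j, h1, h2, h3, h4⟩ := (seg_infix2 _ _ _ _ _).mp hinf
      exact ⟨j, by omega, h1, Or.inr ⟨h2, h4, Or.inl h3⟩⟩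
    · obtain ⟨j, h1, h2, h3, h4⟩ := (seg_infix2 _ _ _ _ _).mp hinf
      exact ⟨j, by omega, h1, Or.inr ⟨h2, h4, Or.inr (Or.inl h3)⟩⟩
    · obtain ⟨j, h1, h2, h3, h4⟩ := (seg_infix2 _ _ _ _ _).mp hinf
      exact ⟨j, by omega, h1, Or.inr ⟨h2, h4, Or.inr (Or.inr (Or.inl h3))⟩⟩
    · obtain ⟨j, h1, h2, h3, h4⟩ := (seg_infix2 _ _ _ _ _).mp hinf
      exact ⟨j, by omega, h1, Or.inr ⟨h2, h4, Or.inr (Or.inr (Or.inr h3))⟩⟩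
  · rintro ⟨j, h1, h2, hw | ⟨h3, h4, hc | hc | hc | hc⟩⟩
    · exact ⟨[' '], by simp, (seg_infix1 _ _ _ _).mpr ⟨j, h2, h1, hw⟩⟩
    · exact ⟨['\n', '\n'], by simp, (seg_infix2 _ _ _ _ _).mpr ⟨j, h2, h3, hc, h4⟩⟩
    · exact ⟨['.', '\n'], by simp, (seg_infix2 _ _ _ _ _).mpr ⟨j, h2, h3, hc, h4⟩⟩
    · exact ⟨['!', '\n'], by simp, (seg_infix2 _ _ _ _ _).mpr ⟨j, h2, h3, hc, h4⟩⟩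
    · exact ⟨['?', '\n'], by simp, (seg_infix2 _ _ _ _ _).mpr ⟨j, h2, h3, hc, h4⟩⟩

theorem find_break_py_unchanged_aux (text : String) (near : Int) (tolerance : Int)
    (hD : ¬ D_find_break_py text near tolerance) :
    find_break_py text near tolerance = find_break_py_alt text near tolerance := by
  by_cases h : 0 ≤ near
  · rw [find_break_py_eq, find_break_py_alt_eq text near tolerance h]
  · have hneg : near < 0 := by omega
    rw [find_break_py_alt_neg text near tolerance hneg, find_break_py_eq]
    simp only [D_find_break_py, not_and] at hD
    have hD0 := hD hneg
    have hDex : ¬ ∃ j < (near + (text.toList.length : Int)).toNat, (near - tolerance).toNat ≤ j ∧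
        (text.toList[j]? = some ' ' ∨
          (j + 2 ≤ (near + (text.toList.length : Int)).toNat ∧ text.toList[j + 1]? = some '\n' ∧
            (text.toList[j]? = some '\n' ∨ text.toList[j]? = some '.' ∨ text.toList[j]? = some '!' ∨
              text.toList[j]? = some '?'))) :=
      fun hex => hD0 ((D_iff_ex text near tolerance hneg).mpr hex)
    rw [not_exists] at hDex
    rw [show ((near + (text.toList.length : Int)).toNat) = pvEnd near text.toList.length from by
      unfold pvEnd; rw [if_pos hneg]] at hDex
    have hD' : ∀ i, ¬ (i < pvEnd near text.toList.length ∧ (near - tolerance).toNat ≤ i ∧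
        (text.toList[i]? = some ' ' ∨
          (i + 2 ≤ pvEnd near text.toList.length ∧ text.toList[i + 1]? = some '\n' ∧
            (text.toList[i]? = some '\n' ∨ text.toList[i]? = some '.' ∨ text.toList[i]? = some '!' ∨
              text.toList[i]? = some '?')))) := by
      intro i hcon
      exact hDex i ⟨hcon.1, hcon.2⟩
    have hA0 : rmostI (pvWs near tolerance) (patPar text.toList) (pvEnd near text.toList.length - 1) = -1 := by
      apply (rmostI_eq_neg_one_iff _ _ _).mpr
      intro i hi1 hi2
      by_contra h'
      rw [Bool.not_eq_false] at h'
      have hb := pvEnd_le near text.toList.length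
      have hp := (patPar_iff _ _ (by omega)).mp h'
      exact hD' i ⟨by omega, by unfold pvWs at hi1; omega, Or.inr ⟨by omega, hp.2, Or.inl hp.1⟩⟩
    have hB0 : rmostI (pvWs near tolerance) (patSent text.toList) (pvEnd near text.toList.length - 1) = -1 := by
      apply (rmostI_eq_neg_one_iff _ _ _).mpr
      intro i hi1 hi2
      by_contra h'
      rw [Bool.not_eq_false] at h'
      have hb := pvEnd_le near text.toList.length
      have hp := (patSent_iff _ _ (by omega)).mp h'
      rcases hp.2 with hsp | hnl
      · exact hD' (i + 1) ⟨by omega, by unfold pvWs at hi1; omega, Or.inl hsp⟩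
      · exact hD' i ⟨by omega, by unfold pvWs at hi1; omega, Or.inr ⟨by omega, hnl, Or.inr hp.1⟩⟩
    have hC0 : rmostI (pvWs near tolerance) (patWord text.toList) (pvEnd near text.toList.length) = -1 := by
      apply (rmostI_eq_neg_one_iff _ _ _).mpr
      intro i hi1 hi2
      by_contra h'
      rw [Bool.not_eq_false] at h'
      have hb := pvEnd_le near text.toList.length
      exact hD' i ⟨hi2, by unfold pvWs at hi1; omega, Or.inl ((patWord_iff _ _ (by omega)).mp h')⟩
    simp only [hA0, hB0, hC0]
    norm_num

theorem find_break_py_exact_aux (text : String) (near : Int) (tolerance : Int)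
    (hD : D_find_break_py text near tolerance) :
    find_break_py text near tolerance ≠ find_break_py_alt text near tolerance := by
  obtain ⟨hneg, hbody⟩ := hD
  obtain ⟨j, hj, hjw, hcase⟩ := (D_iff_ex text near tolerance hneg).mp hbody
  rw [show ((near + (text.toList.length : Int)).toNat) = pvEnd near text.toList.length from by
    unfold pvEnd; rw [if_pos hneg]] at hj hcase
  have hjw' : pvWs near tolerance ≤ j := by unfold pvWs; omega
  rw [find_break_py_alt_neg text near tolerance hneg, find_break_py_eq]
  have hA := rmostI_neg_one_le (pvWs near tolerance) (patPar text.toList) (pvEnd near text.toList.length - 1)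
  have hB := rmostI_neg_one_le (pvWs near tolerance) (patSent text.toList) (pvEnd near text.toList.length - 1)
  have hC := rmostI_neg_one_le (pvWs near tolerance) (patWord text.toList) (pvEnd near text.toList.length)
  have hne : rmostI (pvWs near tolerance) (patPar text.toList) (pvEnd near text.toList.length - 1) ≠ -1 ∨
      rmostI (pvWs near tolerance) (patSent text.toList) (pvEnd near text.toList.length - 1) ≠ -1 ∨
      rmostI (pvWs near tolerance) (patWord text.toList) (pvEnd near text.toList.length) ≠ -1 := by
    have hb := pvEnd_le near text.toList.length
    rcases hcase with hw | ⟨hj2, hnl, hc⟩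
    · exact Or.inr (Or.inr (rmostI_ne_of_wit _ _ _ j hjw' hj ((patWord_iff _ _ (by omega)).mpr hw)))
    · rcases hc with hpar | hp
      · exact Or.inl (rmostI_ne_of_wit _ _ _ j hjw' (by omega) ((patPar_iff _ _ (by omega)).mpr ⟨hpar, hnl⟩))
      · exact Or.inr (Or.inl (rmostI_ne_of_wit _ _ _ j hjw' (by omega)
          ((patSent_iff _ _ (by omega)).mpr ⟨hp, Or.inr hnl⟩)))
  simp only []
  rcases hne with hne | hne | hne <;> split_ifs <;> omega

-- ===== VERDICT (by name: the statement is the Claim_ definition above) =====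
theorem find_break_py_spec : Claim_unchanged_find_break_py := by
  intro text near tolerance _ hD
  exact find_break_py_unchanged_aux text near tolerance hD

theorem find_break_py_changed : Claim_changed_find_break_py := by
  unfold Claim_changed_find_break_py; decide

theorem find_break_py_tight : Claim_exact_find_break_py := by
  intro text near tolerance _ hD
  exact find_break_py_exact_aux text near tolerance hD
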